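-- pv_equiv track=rewrite | github.com/MicJoz/Learning-Python-from-scratch | Python Developer Bootcamp/Basic Python/PreTest/2. name_sorter.py | name_sorter
-- ===== SOURCE A (Python) =====
-- def name_sorter(names):
--     males = []
--     females = []
--     for item in names:
--         if item.endswith("a"):
--             females.append(item)
--         else:
--             males.append(item)
--     output = {
--         "female": sorted(females),
--         "male": sorted(males)
--     }
--     return output
-- ===== SOURCE B (Python) =====
-- def _merge(a, b):
--     out = []
--     i = j = 0
--     while i < len(a) and j < len(b):
--         if a[i] <= b[j]:
--             out.append(a[i])
--             i += 1
--         else: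
--             out.append(b[j])
--             j += 1
--     out.extend(a[i:])
--     out.extend(b[j:])
--     return out
--
--
-- def _split_sort(lst):
--     # returns (sorted females, sorted males) of lst in one divide-and-conquer pass
--     if len(lst) <= 1:
--         if lst and lst[0].endswith("a"):
--             return lst, []
--         return [], lst
--     mid = len(lst) // 2
--     f1, m1 = _split_sort(lst[:mid])
--     f2, m2 = _split_sort(lst[mid:])
--     return _merge(f1, f2), _merge(m1, m2)
--
--
-- def name_sorter(names):
--     females, males = _split_sort(names)
--     return {"female": females, "male": males}
-- ===== Notes on version B (the rewrite author's own statement) =====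
-- stated objective: alternative
-- what changed: A partitions by suffix and then calls sorted on each group; B is a fused divide-and-conquer that recursively splits the list in halves and merge-sorts the female and male groups simultaneously, returning both sorted groups from one recursion with a hand-written merge and no call to sorted and no separate partition pass.
import Mathlib
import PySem

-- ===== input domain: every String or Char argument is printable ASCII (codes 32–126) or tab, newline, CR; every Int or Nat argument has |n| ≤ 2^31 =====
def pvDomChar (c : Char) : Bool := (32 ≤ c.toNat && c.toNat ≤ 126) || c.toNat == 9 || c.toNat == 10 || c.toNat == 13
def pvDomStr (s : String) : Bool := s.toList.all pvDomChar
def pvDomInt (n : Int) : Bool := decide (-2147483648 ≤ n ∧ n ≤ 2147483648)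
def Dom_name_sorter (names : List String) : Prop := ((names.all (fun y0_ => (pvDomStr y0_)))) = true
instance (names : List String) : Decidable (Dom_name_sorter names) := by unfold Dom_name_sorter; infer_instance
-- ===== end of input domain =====

-- B replaces A's partition-then-sort-each-group with one fused divide-and-conquer recursion that merge-sorts both groups simultaneously (hand-written merge, no library sort); objective: alternative.


-- ===== PORT A =====
-- loop: partition into (males, females) with two append-accumulators, then sort each group
def name_sorter (names : List String) : List (String × List String) :=
  let st := names.foldl
    (fun (acc : List String × List String) item =>
      if PySem.Str.endswith item "a" then (acc.1, acc.2 ++ [item]) else (acc.1 ++ [item], acc.2))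
    ([], [])
  [("female", PySem.List.sorted st.2 (fun x => x) false),
   ("male",   PySem.List.sorted st.1 (fun x => x) false)]

-- ===== PORT B =====
-- _merge: the two-pointer while loop as the standard structural recursion over both lists
def pvMerge : List String → List String → List String
  | [], ys => ys
  | x :: xs, [] => x :: xs
  | x :: xs, y :: ys =>
      if x ≤ y then x :: pvMerge xs (y :: ys) else y :: pvMerge (x :: xs) ys

-- _split_sort: divide-and-conquer returning (sorted females, sorted males);
-- lst[:mid] / lst[mid:] are List.take / List.drop (exact: 0 ≤ mid ≤ len, cf. PySem.List.slice_to/slice_from)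
def pvSplitSort : List String → List String × List String
  | [] => ([], [])
  | [x] => if PySem.Str.endswith x "a" then ([x], []) else ([], [x])
  | x :: y :: rest =>
      let lst := x :: y :: rest
      let mid := lst.length / 2
      let p1 := pvSplitSort (lst.take mid)
      let p2 := pvSplitSort (lst.drop mid)
      (pvMerge p1.1 p2.1, pvMerge p1.2 p2.2)
termination_by lst => lst.length
decreasing_by
  · simp [List.length_take]; omega
  · simp [List.length_drop]; omega

def name_sorter_alt (names : List String) : List (String × List String) :=
  let p := pvSplitSort names
  [("female", p.1), ("male", p.2)]

-- ===== PRECONDITION & SPEC =====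
def Spec_name_sorter (names : List String) (out : List (String × List String)) : Prop := out = name_sorter_alt names
instance (names : List String) (out : List (String × List String)) : Decidable (Spec_name_sorter names out) := by unfold Spec_name_sorter; infer_instance

-- ===== CLAIM (what is proved, stated in full; the proofs are below) =====
def Claim_equal_name_sorter : Prop := ∀ (names : List String), Dom_name_sorter names → Spec_name_sorter names (name_sorter names)

-- ===== LEMMAS AND PROOFS =====

-- A's loop: the two accumulators are the two filters (females second)
theorem foldA_eq (f : String → Bool) (xs : List String) (a b : List String) :
    xs.foldl (fun (acc : List String × List String) item =>
      if f item then (acc.1, acc.2 ++ [item]) else (acc.1 ++ [item], acc.2)) (a, b)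
    = (a ++ xs.filter (fun x => ! f x), b ++ xs.filter f) := by
  induction xs generalizing a b with
  | nil => simp
  | cons x t ih =>
    by_cases h : f x = true <;> simp [h, ih]

-- merge is a permutation of the concatenation
theorem pvMerge_perm (a b : List String) : (pvMerge a b).Perm (a ++ b) := by
  induction a, b using pvMerge.induct with
  | case1 ys => simp [pvMerge]
  | case2 x xs => simp [pvMerge]
  | case3 x xs y ys h ih =>
    simpa [pvMerge, h] using ih.cons x
  | case4 x xs y ys h ih =>
    simp only [pvMerge, h]
    exact (ih.cons y).trans List.perm_middle.symm

-- merging two sorted lists yields a sorted list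
theorem pvMerge_pairwise (a b : List String)
    (ha : a.Pairwise (· ≤ ·)) (hb : b.Pairwise (· ≤ ·)) :
    (pvMerge a b).Pairwise (· ≤ ·) := by
  induction a, b using pvMerge.induct with
  | case1 ys => simpa [pvMerge] using hb
  | case2 x xs => simpa [pvMerge] using ha
  | case3 x xs y ys h ih =>
    rw [List.pairwise_cons] at ha
    simp only [pvMerge, h, if_pos]
    refine List.pairwise_cons.2 ⟨?_, ih ha.2 hb⟩
    intro z hz
    rcases List.mem_append.1 ((pvMerge_perm xs (y :: ys)).mem_iff.1 hz) with hz' | hz'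
    · exact ha.1 z hz'
    · rcases List.mem_cons.1 hz' with rfl | hz''
      · exact h
      · rw [List.pairwise_cons] at hb
        exact h.trans (hb.1 z hz'')
  | case4 x xs y ys h ih =>
    rw [List.pairwise_cons] at hb
    simp only [pvMerge, h, if_neg, not_false_iff]
    refine List.pairwise_cons.2 ⟨?_, ih ha hb.2⟩
    intro z hz
    have hy : y ≤ x := le_of_not_ge h
    rcases List.mem_append.1 ((pvMerge_perm (x :: xs) ys).mem_iff.1 hz) with hz' | hz'
    · rcases List.mem_cons.1 hz' with rfl | hz''
      · exact hy
      · rw [List.pairwise_cons] at ha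
        exact hy.trans (ha.1 z hz'')
    · exact hb.1 z hz'

-- merging the sorted halves equals sorting the concatenation
theorem pvMerge_sorted (A B : List String) :
    pvMerge (PySem.List.sorted A (fun x => x) false) (PySem.List.sorted B (fun x => x) false)
      = PySem.List.sorted (A ++ B) (fun x => x) false := by
  symm
  apply PySem.List.sorted_id_eq_of_perm_of_pairwise
  · exact (pvMerge_perm _ _).trans
      ((PySem.List.sorted_perm A (fun x => x) false).append (PySem.List.sorted_perm B (fun x => x) false))
  · exact pvMerge_pairwise _ _
      (PySem.List.sorted_pairwise A (fun x => x)) (PySem.List.sorted_pairwise B (fun x => x))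

-- the invariant of B's recursion: it returns the two sorted filters
theorem pvSplitSort_eq (lst : List String) :
    pvSplitSort lst
      = (PySem.List.sorted (lst.filter (fun x => PySem.Str.endswith x "a")) (fun x => x) false,
         PySem.List.sorted (lst.filter (fun x => ! PySem.Str.endswith x "a")) (fun x => x) false) := by
  induction lst using pvSplitSort.induct with
  | case1 => simp [pvSplitSort, PySem.List.sorted_eq_foldl_insertBy]
  | case2 x h =>
    simp [PySem.Str.endswith] at h
    simp [pvSplitSort, h, PySem.Str.endswith, PySem.List.sorted_eq_foldl_insertBy,
      PySem.List.insertBy]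
  | case3 x h =>
    simp [PySem.Str.endswith] at h
    simp [pvSplitSort, h, PySem.Str.endswith, PySem.List.sorted_eq_foldl_insertBy,
      PySem.List.insertBy]
  | case4 x y rest lst mid ih1 ih2 =>
    rw [pvSplitSort, ih1, ih2]
    simp only [pvMerge_sorted, ← List.filter_append, List.take_append_drop]
    rfl

-- ===== VERDICT (by name: the statement is the Claim_ definition above) =====
theorem name_sorter_spec : Claim_equal_name_sorter := by
  intro names _
  show _ = _
  simp only [name_sorter, name_sorter_alt]
  rw [foldA_eq, pvSplitSort_eq]
  simp
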